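-- pv_equiv track=rewrite | github.com/alikoudar/irobot | backend/app/rag/text_cleaner.py | detect_document_language
-- ===== SOURCE A (Python) =====
-- def detect_document_language(text: str) -> str:
--     """
--     Détecter la langue du document (basique).
--
--     Returns:
--         Code langue ISO (fr, en, etc.)
--     """
--     # Mots-clés français
--     french_keywords = ['le', 'la', 'les', 'de', 'du', 'des', 'et', 'est', 'pour', 'dans']
--
--     # Mots-clés anglais
--     english_keywords = ['the', 'is', 'are', 'for', 'and', 'with', 'this', 'that', 'from']
--
--     text_lower = text.lower()
--     words = text_lower.split()[:200]  # Analyser les 200 premiers mots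
--
--     fr_count = sum(1 for w in words if w in french_keywords)
--     en_count = sum(1 for w in words if w in english_keywords)
--
--     if fr_count > en_count:
--         return 'fr'
--     elif en_count > fr_count:
--         return 'en'
--     else:
--         return 'unknown'
-- ===== SOURCE B (Python) =====
-- def detect_document_language(text: str) -> str:
--     """Signed-score algorithm: each French keyword weighs +1, each English -1;
--     the sign of the single summed score decides the language."""
--     weight = {w: 1 for w in ['le', 'la', 'les', 'de', 'du', 'des', 'et', 'est', 'pour', 'dans']}
--     weight.update({w: -1 for w in ['the', 'is', 'are', 'for', 'and', 'with', 'this', 'that', 'from']})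
--     score = sum(weight.get(w, 0) for w in text.lower().split()[:200])
--     return 'fr' if score > 0 else 'en' if score < 0 else 'unknown'
-- ===== Notes on version B (the rewrite author's own statement) =====
-- stated objective: alternative
-- what changed: Replaces the two keyword counters and their comparison by a signed-score algorithm: one weight table (+1 French, -1 English), one summation, and the sign of the single score picks the language (valid since fr_count>en_count iff fr_count-en_count>0).
import Mathlib
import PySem

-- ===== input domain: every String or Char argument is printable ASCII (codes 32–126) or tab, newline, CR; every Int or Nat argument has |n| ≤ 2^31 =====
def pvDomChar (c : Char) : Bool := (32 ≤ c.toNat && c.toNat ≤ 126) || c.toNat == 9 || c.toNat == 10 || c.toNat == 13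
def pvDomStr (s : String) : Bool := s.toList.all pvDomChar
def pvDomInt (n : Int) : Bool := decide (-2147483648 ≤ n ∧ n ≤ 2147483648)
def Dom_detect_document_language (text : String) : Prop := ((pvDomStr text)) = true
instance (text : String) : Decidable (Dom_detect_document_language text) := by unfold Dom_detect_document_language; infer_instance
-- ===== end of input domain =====

-- B replaces A's two keyword counters by one signed weighted sum (+1 French, -1 English) decided by its sign (alternative decomposition; same result).

-- ===== PORT A =====
def frKeywords : List String := ["le", "la", "les", "de", "du", "des", "et", "est", "pour", "dans"]
def enKeywords : List String := ["the", "is", "are", "for", "and", "with", "this", "that", "from"]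

def detect_document_language (text : String) : String :=
  let words := PySem.List.slice (PySem.Str.split₀ (PySem.Str.lower text)) none (some 200)
  let fr_count := words.foldl (fun acc w => if frKeywords.contains w then acc + 1 else acc) (0 : Nat)
  let en_count := words.foldl (fun acc w => if enKeywords.contains w then acc + 1 else acc) (0 : Nat)
  if fr_count > en_count then "fr"
  else if en_count > fr_count then "en"
  else "unknown"

-- ===== PORT B =====
def weightTable : PySem.Dict String Int :=
  enKeywords.foldl (fun d w => d.insert w (-1))
    (frKeywords.foldl (fun d w => d.insert w 1) PySem.Dict.empty)

def detect_document_language_alt (text : String) : String :=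
  let score := (PySem.List.slice (PySem.Str.split₀ (PySem.Str.lower text)) none (some 200)).foldl
      (fun (s : Int) w => s + weightTable.getD w 0) 0
  if score > 0 then "fr" else if score < 0 then "en" else "unknown"

-- ===== PRECONDITION & SPEC =====
def Spec_detect_document_language (text : String) (out : String) : Prop := out = detect_document_language_alt text
instance (text : String) (out : String) : Decidable (Spec_detect_document_language text out) := by unfold Spec_detect_document_language; infer_instance

-- ===== CLAIM (what is proved, stated in full; the proofs are below) =====
def Claim_equal_detect_document_language : Prop := ∀ (text : String), Dom_detect_document_language text → Spec_detect_document_language text (detect_document_language text)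

-- ===== LEMMAS AND PROOFS =====

lemma table_getD (w : String) :
    weightTable.getD w 0 =
      if enKeywords.contains w then -1
      else if frKeywords.contains w then 1
      else 0 := by
  by_cases he : w ∈ enKeywords
  · fin_cases he <;> rfl
  · by_cases hf : w ∈ frKeywords
    · fin_cases hf <;> rfl
    · simp only [enKeywords, frKeywords, List.mem_cons, List.not_mem_nil, or_false,
        not_or] at he hf
      obtain ⟨e1, e2, e3, e4, e5, e6, e7, e8, e9⟩ := he
      obtain ⟨f1, f2, f3, f4, f5, f6, f7, f8, f9, f10⟩ := hf
      simp [weightTable, enKeywords, frKeywords, List.foldl, PySem.Dict.getD,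
        PySem.Dict.get?_insert,
        e1, e2, e3, e4, e5, e6, e7, e8, e9, f1, f2, f3, f4, f5, f6, f7, f8, f9, f10,
        PySem.Dict.get?_empty, List.contains_eq_mem]

lemma disjoint_kw (w : String) (hf : w ∈ frKeywords) : w ∉ enKeywords := by
  fin_cases hf <;> decide

lemma foldl_count (p : String → Bool) (ws : List String) (a : Nat) :
    ws.foldl (fun acc w => if p w then acc + 1 else acc) a = a + ws.countP p := by
  induction ws generalizing a with
  | nil => simp
  | cons w ws ih =>
    by_cases h : p w <;> simp [List.foldl, h, ih] <;> omega

lemma foldl_score (ws : List String) (s : Int) :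
    ws.foldl (fun (s : Int) w => s + weightTable.getD w 0) s
    = s + (ws.countP (fun w => frKeywords.contains w) : Int)
        - (ws.countP (fun w => enKeywords.contains w) : Int) := by
  induction ws generalizing s with
  | nil => simp
  | cons w ws ih =>
    rw [List.foldl_cons, List.countP_cons, List.countP_cons, ih, table_getD w]
    by_cases hf : w ∈ frKeywords
    · have hne : w ∉ enKeywords := disjoint_kw w hf
      simp [List.contains_eq_mem, hf, hne]
      push_cast
      ring
    · by_cases he : w ∈ enKeywords <;>
        simp [List.contains_eq_mem, hf, he] <;> push_cast <;> ring

lemma sign_decision (f e : Nat) :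
    (if f > e then "fr" else if e > f then "en" else "unknown")
    = (if (f : Int) - e > 0 then "fr" else if (f : Int) - e < 0 then "en" else "unknown") := by
  split_ifs <;> first | rfl | omega

-- ===== VERDICT (by name: the statement is the Claim_ definition above) =====
theorem detect_document_language_spec : Claim_equal_detect_document_language := by
  intro text _
  unfold Spec_detect_document_language detect_document_language detect_document_language_alt
  simp only [foldl_score, foldl_count, Nat.zero_add, Int.zero_add]
  exact sign_decision _ _
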